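-- pv_equiv track=rewrite | github.com/Marven11/FenJing-Legacy | example.py | waf
-- ===== SOURCE A (Python) =====
-- def waf(s: str):
--     blacklist = [
--         "config", "self", "g", "os", "class", "length", "mro", "base", "request", "lipsum",
--         "[", '"', "'", "_", ".", "+", "~",
--         "0", "1", "2", "3", "4", "5", "6", "7", "8", "9",
--         "０","１","２","３","４","５","６","７","８","９"
--     ]
--
--     for word in blacklist:
--         if word in s:
--             return False
--     return True
-- ===== SOURCE B (Python) =====
-- def waf(s: str):
--     # Single forbidden characters (every 1-char blacklist entry, plus 'g' which
--     # also covers the multi-char words "config" and "length"), then the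
--     # remaining multi-char words that contain no forbidden character.
--     bad_chars = set('g["\'_.+~0123456789０１２３４５６７８９')
--     bad_words = ("self", "os", "class", "mro", "base", "request", "lipsum")
--     if any(c in bad_chars for c in s):
--         return False
--     return not any(w in s for w in bad_words)
-- ===== Notes on version B (the rewrite author's own statement) =====
-- stated objective: alternative
-- what changed: A's word-major loop (substring search of all 31 blacklist entries in s) is replaced by a single character-set membership scan over s (covering every one-character entry plus 'g', which subsumes 'config' and 'length') followed by a substring check of only the 7 remaining multi-character words.
import Mathlib
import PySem

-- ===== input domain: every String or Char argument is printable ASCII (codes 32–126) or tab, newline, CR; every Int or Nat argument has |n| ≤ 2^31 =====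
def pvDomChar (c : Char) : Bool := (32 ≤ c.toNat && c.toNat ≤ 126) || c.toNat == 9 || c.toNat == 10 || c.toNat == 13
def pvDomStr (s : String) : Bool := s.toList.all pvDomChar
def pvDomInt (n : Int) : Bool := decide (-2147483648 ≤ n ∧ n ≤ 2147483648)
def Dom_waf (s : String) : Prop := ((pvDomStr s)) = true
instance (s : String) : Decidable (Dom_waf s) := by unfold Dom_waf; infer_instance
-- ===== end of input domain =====

-- B replaces A's 31-word substring loop by one character-set membership scan of s
-- (all one-char blacklist entries plus 'g', which subsumes "config" and "length"),
-- then a substring check of only the 7 remaining multi-char words.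

-- ===== PORT A =====
def pvBlacklist : List String :=
  ["config", "self", "g", "os", "class", "length", "mro", "base", "request", "lipsum",
   "[", "\"", "'", "_", ".", "+", "~",
   "0", "1", "2", "3", "4", "5", "6", "7", "8", "9",
   "０", "１", "２", "３", "４", "５", "６", "７", "８", "９"]

-- A's for-loop over the blacklist with early return False
def wafLoop (s : String) : List String → Bool
  | [] => true
  | w :: rest => if PySem.Str.isIn w s then false else wafLoop s rest

def waf (s : String) : Bool := wafLoop s pvBlacklist

-- ===== PORT B =====
-- the Python set literal of forbidden single characters
def pvBadChars : PySem.Set Char :=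
  PySem.Set.ofList "g[\"'_.+~0123456789０１２３４５６７８９".toList

def pvBadWords : List String :=
  ["self", "os", "class", "mro", "base", "request", "lipsum"]

def waf_alt (s : String) : Bool :=
  if s.toList.any (fun c => PySem.Set.contains pvBadChars c) then false
  else !(pvBadWords.any (fun w => PySem.Str.isIn w s))

-- ===== PRECONDITION & SPEC =====
def Spec_waf (s : String) (out : Bool) : Prop := out = waf_alt s
instance (s : String) (out : Bool) : Decidable (Spec_waf s out) := by unfold Spec_waf; infer_instance

-- ===== CLAIM (what is proved, stated in full; the proofs are below) =====
def Claim_equal_waf : Prop := ∀ (s : String), Dom_waf s → Spec_waf s (waf s)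

-- ===== LEMMAS AND PROOFS =====

-- the forbidden-character set, as a plain char list for the lemmas below
def pvBC : List Char :=
  ['g','[','"','\'','_','.','+','~','0','1','2','3','4','5','6','7','8','9',
   '０','１','２','３','４','５','６','７','８','９']

theorem contains_bc (c : Char) : PySem.Set.contains pvBadChars c = true ↔ c ∈ pvBC := by
  simp [pvBadChars, PySem.Set.ofList, PySem.Set.contains, pvBC]

theorem wafLoop_eq_all (s : String) (ws : List String) :
    wafLoop s ws = ws.all (fun w => !PySem.Str.isIn w s) := by
  induction ws with
  | nil => rfl
  | cons w rest ih =>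
      simp only [wafLoop, List.all_cons, ih]
      cases h : PySem.Str.isIn w s <;> simp [h]

theorem singleton_infix_iff {c : Char} {cs : List Char} : [c] <:+: cs ↔ c ∈ cs := by
  constructor
  · intro h; exact h.subset (List.mem_singleton.mpr rfl)
  · intro h
    obtain ⟨l, r, rfl⟩ := List.append_of_mem h
    exact ⟨l, r, by simp⟩

-- every blacklist entry is either a kept multi-char word or contains a forbidden char
theorem blacklist_cover :
    ∀ w ∈ pvBlacklist, w ∈ pvBadWords ∨ ∃ c ∈ w.toList, PySem.Set.contains pvBadChars c = true := by
  intro w hw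
  simp only [contains_bc]
  fin_cases hw <;> simp [pvBadWords, pvBC]

-- every forbidden char is itself (as a 1-char string) a blacklist entry
theorem badchar_blacklist : ∀ c ∈ pvBC, ∃ w ∈ pvBlacklist, w.toList = [c] := by
  intro c hc
  fin_cases hc <;> simp [pvBlacklist]

-- the kept multi-char words are blacklist entries
theorem badwords_sub : ∀ w ∈ pvBadWords, w ∈ pvBlacklist := by
  intro w hw; fin_cases hw <;> simp [pvBlacklist]

theorem waf_spec_aux (s : String) : waf s = waf_alt s := by
  unfold waf waf_alt
  rw [wafLoop_eq_all]
  by_cases hchar : s.toList.any (fun c => PySem.Set.contains pvBadChars c) = true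
  · rw [if_pos hchar]
    obtain ⟨c, hcs, hcm⟩ := List.any_eq_true.mp hchar
    obtain ⟨w, hwmem, hwc⟩ := badchar_blacklist c ((contains_bc c).mp hcm)
    apply List.all_eq_false.mpr
    refine ⟨w, hwmem, ?_⟩
    have hin : PySem.Str.isIn w s = true := by
      rw [PySem.Str.isIn_eq, PySem.Chars.isIn_iff_infix, hwc, singleton_infix_iff]
      exact hcs
    have hin' : PySem.Chars.isIn w.toList s.toList = true := by
      rw [← PySem.Str.isIn_eq]; exact hin
    simp [hin']
  · rw [if_neg hchar]
    have hnoc : ∀ c ∈ s.toList, PySem.Set.contains pvBadChars c = false := by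
      intro c hc
      by_contra h
      exact hchar (List.any_eq_true.mpr ⟨c, hc, Bool.not_eq_false _ |>.mp h⟩)
    rw [Bool.eq_iff_iff]
    simp only [List.all_eq_true, Bool.not_eq_true', Bool.not_eq_true, List.any_eq_false]
    constructor
    · intro h w hw
      exact h w (badwords_sub w hw)
    · intro h w hw
      rcases blacklist_cover w hw with hbw | ⟨c, hcw, hcb⟩
      · exact h w hbw
      · -- w contains a forbidden char; if w were in s, that char would be too
        cases hin : PySem.Str.isIn w s with
        | false => rfl
        | true =>
            have hinf := (PySem.Chars.isIn_iff_infix _ _).mp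
              (by rw [← PySem.Str.isIn_eq]; exact hin)
            have hmem : c ∈ s.toList := hinf.subset hcw
            rw [hnoc c hmem] at hcb
            exact absurd hcb (by simp)

-- ===== VERDICT (by name: the statement is the Claim_ definition above) =====
theorem waf_spec : Claim_equal_waf := by
  intro s _
  exact waf_spec_aux s
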